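-- pv_equiv track=rewrite | github.com/Xiaoxiaomingbao/Biblio-project-of-zhihu | set_ncx.py | set_navpoint
-- ===== SOURCE A (Python) =====
-- def format_num(number):
--     if number > 999:
--         return str(number)
--     elif number > 99:
--         return '0' + str(number)
--     elif number > 9:
--         return '00' + str(number)
--     else:
--         return '000' + str(number)
--
-- def set_navpoint(nav,contents,order):
--     content = contents[order]
--     level = int(content[1][-1:])
--     order = order + 1
--     np_id = 'navPoint' + str(order)
--     np = '<navPoint id="' + np_id + '" playOrder="' + str(order) + '">'
--     nl = '<navLabel><text>' + content[0] + '</navLabel></text>'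
--     pre_path = 'part' + format_num(order) + '.html'
--     path = 'Text/' + pre_path
--     ct = '<content src="' + path + '"/>'
--     if order < len(contents):
--         content = contents[order]
--         new_level = int(content[1][-1:])
--         if new_level > level:
--             base = nav + np + nl + ct
--             return set_navpoint(base,contents,order)
--         elif new_level == level:
--             base = nav + np + nl + ct + '</navPoint>'
--             return set_navpoint(base,contents,order)
--         else:
--             base = nav + np + nl + ct + '</navPoint>'
--             for k in range(level - new_level):
--                 base = base + '</navPoint>'
--             return set_navpoint(base,contents,order)
--     else:
--         base = nav + np + nl + ct + '</navPoint>'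
--         return base
-- ===== SOURCE B (Python) =====
-- def format_num(number):
--     if number > 999:
--         return str(number)
--     elif number > 99:
--         return '0' + str(number)
--     elif number > 9:
--         return '00' + str(number)
--     else:
--         return '000' + str(number)
--
-- def set_navpoint(nav, contents, order):
--     n = len(contents)
--     parts = [nav]
--     i = order
--     while True:
--         content = contents[i]
--         level = int(content[1][-1:])
--         i += 1
--         parts.append('<navPoint id="navPoint' + str(i) + '" playOrder="' + str(i) + '">')
--         parts.append('<navLabel><text>' + content[0] + '</navLabel></text>')
--         parts.append('<content src="Text/part' + format_num(i) + '.html"/>')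
--         if i < n:
--             new_level = int(contents[i][1][-1:])
--             if new_level > level:
--                 closes = 0
--             elif new_level == level:
--                 closes = 1
--             else:
--                 closes = 1 + (level - new_level)
--             parts.append('</navPoint>' * closes)
--         else:
--             parts.append('</navPoint>')
--             return ''.join(parts)
-- ===== Notes on version B (the rewrite author's own statement) =====
-- stated objective: alternative
-- what changed: A's tail recursion that threads a growing string accumulator through recursive calls is replaced by a single explicit while loop that appends chunk strings to a list and joins them once at the end, with the per-branch closing tags computed as one count and emitted via string repetition.
import Mathlib
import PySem

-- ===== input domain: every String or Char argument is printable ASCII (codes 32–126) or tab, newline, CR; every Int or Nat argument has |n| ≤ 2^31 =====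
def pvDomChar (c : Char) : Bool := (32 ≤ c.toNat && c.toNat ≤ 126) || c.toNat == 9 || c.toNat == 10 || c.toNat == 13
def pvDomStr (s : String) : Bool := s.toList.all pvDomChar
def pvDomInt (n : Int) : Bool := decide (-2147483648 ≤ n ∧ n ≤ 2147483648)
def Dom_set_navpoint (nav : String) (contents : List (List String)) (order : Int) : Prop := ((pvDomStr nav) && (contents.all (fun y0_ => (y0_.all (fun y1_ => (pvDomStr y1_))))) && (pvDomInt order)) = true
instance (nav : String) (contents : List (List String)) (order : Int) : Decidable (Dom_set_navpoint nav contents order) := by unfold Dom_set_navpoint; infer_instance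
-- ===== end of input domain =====

-- B replaces A's tail recursion (string accumulator threaded through recursive calls) by one
-- while loop that appends chunks to a list and ''.join-s it once at the end (objective: alternative decomposition).

-- exact port of Python str '+' (characters concatenated; kernel-friendly, unlike String.append)
def pyStrAdd (a b : String) : String := String.ofList (a.toList ++ b.toList)

-- ===== PORT A =====
def format_num (number : Int) : String :=
  if number > 999 then PySem.Int.toStr number
  else if number > 99 then pyStrAdd "0" (PySem.Int.toStr number)
  else if number > 9 then pyStrAdd "00" (PySem.Int.toStr number)
  else pyStrAdd "000" (PySem.Int.toStr number)

-- content[i] / content[1] / int(content[1][-1:]) — the shared raising prefix of each iteration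
def readLevel (contents : List (List String)) (i : Int) : Option (List String × Int) :=
  match PySem.List.pyGet? contents i with
  | none => none              -- IndexError (outside Pre_)
  | some content =>
  match PySem.List.pyGet? content 1 with
  | none => none              -- IndexError (outside Pre_)
  | some c1 =>
  match PySem.Int.ofStr? (PySem.Str.slice c1 (some (-1))) with
  | none => none              -- ValueError (outside Pre_)
  | some level => some (content, level)

def set_navpoint (nav : String) (contents : List (List String)) (order : Int) : String :=
  match readLevel contents order with
  | none => ""
  | some (content, level) =>
  match PySem.List.pyGet? content 0 with
  | none => ""                -- IndexError (outside Pre_)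
  | some c0 =>
    let order' := order + 1
    let np_id := pyStrAdd "navPoint" (PySem.Int.toStr order')
    let np := pyStrAdd (pyStrAdd (pyStrAdd "<navPoint id=\"" np_id) "\" playOrder=\"") (pyStrAdd (PySem.Int.toStr order') "\">")
    let nl := pyStrAdd (pyStrAdd "<navLabel><text>" c0) "</navLabel></text>"
    let pre_path := pyStrAdd (pyStrAdd "part" (format_num order')) ".html"
    let path := pyStrAdd "Text/" pre_path
    let ct := pyStrAdd (pyStrAdd "<content src=\"" path) "\"/>"
    if _h : order' < (contents.length : Int) then
      match readLevel contents order' with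
      | none => ""
      | some (_, new_level) =>
        if new_level > level then
          set_navpoint (pyStrAdd (pyStrAdd (pyStrAdd nav np) nl) ct) contents order'
        else if new_level = level then
          set_navpoint (pyStrAdd (pyStrAdd (pyStrAdd (pyStrAdd nav np) nl) ct) "</navPoint>") contents order'
        else
          set_navpoint ((PySem.List.pyRange 0 (level - new_level)).foldl
            (fun b _ => pyStrAdd b "</navPoint>")
            (pyStrAdd (pyStrAdd (pyStrAdd (pyStrAdd nav np) nl) ct) "</navPoint>")) contents order'
    else
      pyStrAdd (pyStrAdd (pyStrAdd (pyStrAdd nav np) nl) ct) "</navPoint>"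
termination_by ((contents.length : Int) - order).toNat
decreasing_by all_goals omega

-- ===== PORT B =====
-- the while loop of Source B: `parts` is the accumulating list, `i` the running index
def altLoop (contents : List (List String)) (parts : List String) (i : Int) : String :=
  match readLevel contents i with
  | none => ""
  | some (content, level) =>
  match PySem.List.pyGet? content 0 with
  | none => ""                -- IndexError (outside Pre_)
  | some c0 =>
    let i' := i + 1
    let np := pyStrAdd (pyStrAdd (pyStrAdd "<navPoint id=\"navPoint" (PySem.Int.toStr i')) "\" playOrder=\"") (pyStrAdd (PySem.Int.toStr i') "\">")
    let nl := pyStrAdd (pyStrAdd "<navLabel><text>" c0) "</navLabel></text>"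
    let ct := pyStrAdd (pyStrAdd "<content src=\"Text/part" (format_num i')) ".html\"/>"
    if _h : i' < (contents.length : Int) then
      match readLevel contents i' with
      | none => ""
      | some (_, new_level) =>
        let closes : Int := if new_level > level then 0 else if new_level = level then 1 else 1 + (level - new_level)
        altLoop contents (parts ++ [np, nl, ct, String.ofList (PySem.List.pyRepeat "</navPoint>".toList closes)]) i'
    else
      PySem.Str.join "" (parts ++ [np, nl, ct, "</navPoint>"])
termination_by ((contents.length : Int) - i).toNat
decreasing_by all_goals omega

def set_navpoint_alt (nav : String) (contents : List (List String)) (order : Int) : String :=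
  altLoop contents [nav] order

-- ===== PRECONDITION & SPEC =====
-- a usable row: at least two cells, and the last character of row[1] parses as an int
def rowOk (c : List String) : Bool :=
  decide (2 ≤ c.length) && (PySem.Int.ofStr? (PySem.Str.slice (c.getD 1 "") (some (-1)))).isSome

-- Pre_ = exactly the inputs on which the Python A returns (no IndexError/ValueError): the start
-- index is a valid (possibly negative) index into contents, and every row the recursion visits
-- (all rows from index max(order,0) on; a negative start wraps and later revisits 0..n-1) is usable.
def Pre_set_navpoint (nav : String) (contents : List (List String)) (order : Int) : Prop :=
  -(contents.length : Int) ≤ order ∧ order < (contents.length : Int) ∧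
    ∀ c ∈ contents.drop order.toNat, rowOk c = true
instance (nav : String) (contents : List (List String)) (order : Int) : Decidable (Pre_set_navpoint nav contents order) := by unfold Pre_set_navpoint; infer_instance

def pvWitness_set_navpoint : String × List (List String) × Int :=
  ("", [["Intro", "lvl1"], ["Sub", "lvl2"], ["Next", "lvl1"]], 0)

def Spec_set_navpoint (nav : String) (contents : List (List String)) (order : Int) (out : String) : Prop := out = set_navpoint_alt nav contents order
instance (nav : String) (contents : List (List String)) (order : Int) (out : String) : Decidable (Spec_set_navpoint nav contents order out) := by unfold Spec_set_navpoint; infer_instance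

-- ===== CLAIM (what is proved, stated in full; the proofs are below) =====
def Claim_equal_set_navpoint : Prop := ∀ (nav : String) (contents : List (List String)) (order : Int), Dom_set_navpoint nav contents order → Pre_set_navpoint nav contents order → Spec_set_navpoint nav contents order (set_navpoint nav contents order)

-- ===== LEMMAS AND PROOFS =====

theorem toList_pyStrAdd (a b : String) : (pyStrAdd a b).toList = a.toList ++ b.toList := by
  simp [pyStrAdd]

theorem str_ext {a b : String} (h : a.toList = b.toList) : a = b := by
  have h2 := congrArg String.ofList h
  simp at h2
  exact h2

theorem join_nil_eq_flatten : ∀ l : List (List Char), PySem.Chars.join [] l = l.flatten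
  | [] => by simp [PySem.Chars.join_nil]
  | [x] => by simp [PySem.Chars.join_singleton]
  | x :: y :: r => by
    rw [PySem.Chars.join_cons_cons, join_nil_eq_flatten (y :: r)]
    simp

theorem pyGet?_mem_drop {α : Type} (xs : List α) (i : Int)
    (h1 : -(xs.length : Int) ≤ i) (h2 : i < xs.length) :
    ∃ c, PySem.List.pyGet? xs i = some c ∧ c ∈ xs.drop i.toNat := by
  simp only [PySem.List.pyGet?, PySem.List.pyIdx?]
  by_cases h0 : 0 ≤ i
  · have hlt : i.toNat < xs.length := by omega
    refine ⟨xs[i.toNat], ?_, ?_⟩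
    · simp [h0, h2]
    · have h0' : (xs.drop i.toNat)[0]'(by simp; omega) = xs[i.toNat] := by
        simp
      exact h0' ▸ List.getElem_mem _
  · have hlt : xs.length - (-i).toNat < xs.length := by omega
    refine ⟨xs[xs.length - (-i).toNat], ?_, ?_⟩
    · simp [h0, h1, List.getElem?_eq_getElem hlt]
    · have hz : i.toNat = 0 := by omega
      rw [hz]
      simp

theorem pyGet?_one (c : List String) (h : 2 ≤ c.length) :
    PySem.List.pyGet? c 1 = some (c.getD 1 "") := by
  have h1 : 1 < c.length := by omega
  simp [PySem.List.pyGet?, PySem.List.pyIdx?, List.getD,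
    (by exact_mod_cast h1 : (1 : Int) < (c.length : Int)), List.getElem?_eq_getElem h1]

theorem pyGet?_zero (c : List String) (h : 2 ≤ c.length) :
    PySem.List.pyGet? c 0 = some (c.getD 0 "") := by
  have h0 : 0 < c.length := by omega
  simp [PySem.List.pyGet?, PySem.List.pyIdx?, List.getD, h0]

theorem foldl_close_nat (k : Nat) (b : String) :
    ((PySem.List.pyRange 0 (k : Int)).foldl (fun x _ => pyStrAdd x "</navPoint>") b).toList
      = b.toList ++ (List.replicate k "</navPoint>".toList).flatten := by
  induction k with
  | zero => simp [PySem.List.pyRange_one_eq_nil (by omega : (0:Int) ≤ 0)]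
  | succ k ih =>
    have hcast : ((k + 1 : Nat) : Int) = (k : Int) + 1 := by push_cast; ring
    rw [hcast, PySem.List.pyRange_one_succ_right (by positivity), List.foldl_append]
    simp only [List.foldl_cons, List.foldl_nil, toList_pyStrAdd, ih,
      List.replicate_succ', List.flatten_append]
    simp

theorem foldl_close (d : Int) (b : String) :
    ((PySem.List.pyRange 0 d).foldl (fun x _ => pyStrAdd x "</navPoint>") b).toList
      = b.toList ++ (List.replicate d.toNat "</navPoint>".toList).flatten := by
  by_cases hd : 0 ≤ d
  · obtain ⟨k, rfl⟩ : ∃ k : Nat, d = (k : Int) := ⟨d.toNat, by omega⟩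
    rw [foldl_close_nat]
    simp
  · rw [PySem.List.pyRange_one_eq_nil (by omega : d ≤ 0)]
    have : d.toNat = 0 := by omega
    simp [this]

theorem main_eq (contents : List (List String)) :
    ∀ (m : Nat) (order : Int), ((contents.length : Int) - order).toNat ≤ m →
    -(contents.length : Int) ≤ order → order < (contents.length : Int) →
    (∀ c ∈ contents.drop order.toNat, rowOk c = true) →
    ∀ (nav : String) (parts : List String),
    (parts.map String.toList).flatten = nav.toList →
    set_navpoint nav contents order = altLoop contents parts order := by
  intro m
  induction m with
  | zero => intro order hm h1 h2 _ _ _ _; omega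
  | succ m ih =>
    intro order hm h1 h2 hrows nav parts hflat
    obtain ⟨content, hget, hmem⟩ := pyGet?_mem_drop contents order h1 h2
    have hrow := hrows content hmem
    rw [rowOk, Bool.and_eq_true, decide_eq_true_iff, Option.isSome_iff_exists] at hrow
    obtain ⟨h2le, level, hlev⟩ := hrow
    have hrl : readLevel contents order = some (content, level) := by
      rw [readLevel, hget]
      dsimp only
      rw [pyGet?_one content h2le]
      dsimp only
      rw [hlev]
    have hc0 := pyGet?_zero content h2le
    rw [set_navpoint.eq_def, altLoop.eq_def, hrl]
    dsimp only
    rw [hc0]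
    dsimp only
    by_cases hlt : order + 1 < (contents.length : Int)
    · rw [dif_pos hlt, dif_pos hlt]
      have hsub : ∀ c ∈ contents.drop (order + 1).toNat, rowOk c = true := by
        intro c hc
        apply hrows
        have hk : (order + 1).toNat = order.toNat + ((order + 1).toNat - order.toNat) := by omega
        rw [hk, ← List.drop_drop] at hc
        exact List.drop_subset _ _ hc
      obtain ⟨content2, hget2, hmem2⟩ := pyGet?_mem_drop contents (order + 1) (by omega) hlt
      have hrow2 := hsub content2 hmem2
      rw [rowOk, Bool.and_eq_true, decide_eq_true_iff, Option.isSome_iff_exists] at hrow2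
      obtain ⟨h2le2, new_level, hlev2⟩ := hrow2
      have hrl2 : readLevel contents (order + 1) = some (content2, new_level) := by
        rw [readLevel, hget2]
        dsimp only
        rw [pyGet?_one content2 h2le2]
        dsimp only
        rw [hlev2]
      rw [hrl2]
      dsimp only
      by_cases hgt : new_level > level
      · rw [if_pos hgt, if_pos hgt]
        apply ih (order + 1) (by omega) (by omega) hlt hsub
        simp [toList_pyStrAdd, hflat, PySem.List.pyRepeat]
      · rw [if_neg hgt, if_neg hgt]
        by_cases heq : new_level = level
        · rw [if_pos heq, if_pos heq]
          apply ih (order + 1) (by omega) (by omega) hlt hsub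
          simp [toList_pyStrAdd, hflat, PySem.List.pyRepeat]
        · rw [if_neg heq, if_neg heq]
          apply ih (order + 1) (by omega) (by omega) hlt hsub
          have hd : (1 + (level - new_level)).toNat = 1 + (level - new_level).toNat := by omega
          simp [foldl_close, toList_pyStrAdd, hflat, PySem.List.pyRepeat, hd,
            List.replicate_add, List.flatten_append]
    · rw [dif_neg hlt, dif_neg hlt]
      apply str_ext
      simp [toList_pyStrAdd, join_nil_eq_flatten, List.flatten_append, hflat]

-- ===== VERDICT (by name: the statement is the Claim_ definition above) =====
theorem set_navpoint_spec : Claim_equal_set_navpoint := by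
  intro nav contents order _hDom hPre
  obtain ⟨h1, h2, hrows⟩ := hPre
  show set_navpoint nav contents order = set_navpoint_alt nav contents order
  rw [set_navpoint_alt]
  apply main_eq contents (((contents.length : Int) - order).toNat) order le_rfl h1 h2 hrows
  simp
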